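-- pv_equiv track=rewrite | github.com/paweld2004/Pp1-25 | 04-Subroutines/40.py | sum_repeated_digits
-- ===== SOURCE A (Python) =====
-- def sum_repeated_digits(number):
--     number_str = str(number)
--     unique_digits = set(number_str)
--     total = 0
--     for digit in unique_digits:
--         count = number_str.count(digit)
--         if count > 1:
--             total += int(digit) * count
--     return total
-- ===== SOURCE B (Python) =====
-- def sum_repeated_digits(number):
--     chars = sorted(str(number))
--     total = 0
--     while chars:
--         c = chars[0]
--         run = 1
--         while run < len(chars) and chars[run] == c:
--             run += 1
--         if run > 1:
--             total += int(c) * run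
--         chars = chars[run:]
--     return total
-- ===== Notes on version B (the rewrite author's own statement) =====
-- stated objective: alternative
-- what changed: B sorts the characters of str(number) and scans equal runs once, adding digit*run-length for each repeated run, instead of calling str.count for every distinct character.
import Mathlib
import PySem

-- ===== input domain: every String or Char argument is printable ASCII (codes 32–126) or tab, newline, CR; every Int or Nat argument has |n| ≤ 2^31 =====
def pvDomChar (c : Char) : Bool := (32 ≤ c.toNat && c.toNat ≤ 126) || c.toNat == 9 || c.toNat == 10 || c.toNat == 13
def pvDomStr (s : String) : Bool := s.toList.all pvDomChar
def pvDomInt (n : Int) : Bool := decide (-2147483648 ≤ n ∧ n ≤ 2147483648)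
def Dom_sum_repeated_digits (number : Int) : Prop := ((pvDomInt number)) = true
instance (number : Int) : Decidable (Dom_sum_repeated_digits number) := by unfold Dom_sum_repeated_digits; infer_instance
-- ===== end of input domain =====

-- B sorts the characters of str(number) and scans equal runs once instead of calling str.count per distinct character; return values proved equal.


-- int(digit) for a one-character string; in both programs it is only reached on
-- decimal digit characters of str(number) (a '-' occurs at most once), where
-- PySem.Int.ofChars? is some and Python's int() returns normally.
def pvDigitInt (c : Char) : Int := (PySem.Int.ofChars? [c]).getD 0

-- ===== PORT A =====
def sum_repeated_digits (number : Int) : Int :=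
  let number_str := PySem.Int.toChars number
  let unique_digits := PySem.Set.ofList number_str
  unique_digits.foldl
    (fun total digit =>
      let count := PySem.Chars.count number_str [digit]
      if count > 1 then total + pvDigitInt digit * (count : Int) else total) 0

-- ===== PORT B =====
-- the run-scanning while loop of Source B: take the leading run, add if its length > 1, continue on the rest
def pvRuns : List Char → Int
  | [] => 0
  | c :: rest =>
      (if (rest.takeWhile (fun d => d == c)).length + 1 > 1 then
         pvDigitInt c * ((((rest.takeWhile (fun d => d == c)).length + 1 : Nat) : Int)) else 0)
      + pvRuns (rest.dropWhile (fun d => d == c))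
termination_by m => m.length
decreasing_by
  simp only [List.length_cons]
  exact Nat.lt_succ_of_le (List.length_dropWhile_le _ _)

def sum_repeated_digits_alt (number : Int) : Int :=
  pvRuns (PySem.List.sorted (PySem.Int.toChars number) id)

-- ===== PRECONDITION & SPEC =====
def Spec_sum_repeated_digits (number : Int) (out : Int) : Prop := out = sum_repeated_digits_alt number
instance (number : Int) (out : Int) : Decidable (Spec_sum_repeated_digits number out) := by unfold Spec_sum_repeated_digits; infer_instance

-- ===== CLAIM (what is proved, stated in full; the proofs are below) =====
def Claim_equal_sum_repeated_digits : Prop := ∀ (number : Int), Dom_sum_repeated_digits number → Spec_sum_repeated_digits number (sum_repeated_digits number)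

-- ===== LEMMAS AND PROOFS =====

-- the per-character contribution both programs add, parametrised by the multiset of characters
def pvContrib (s : List Char) (c : Char) : Int :=
  if s.count c > 1 then pvDigitInt c * (s.count c : Int) else 0

-- str.count of a single-character needle is List.count
lemma count_go_singleton (c : Char) :
    ∀ (l : List Char) (fuel acc : Nat), l.length ≤ fuel →
      PySem.Chars.count.go [c] fuel l acc = acc + l.count c := by
  intro l
  induction l with
  | nil => intro fuel acc _; cases fuel <;> simp [PySem.Chars.count.go]
  | cons h t ih =>
      intro fuel acc hf
      cases fuel with
      | zero => simp at hf
      | succ n =>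
          simp only [List.length_cons, Nat.succ_le_succ_iff] at hf
          by_cases hc : h = c
          · subst hc
            rw [show PySem.Chars.count.go [h] (n+1) (h :: t) acc
                  = PySem.Chars.count.go [h] n t (acc + 1) by
                  simp [PySem.Chars.count.go, List.isPrefixOf]]
            rw [ih n (acc + 1) hf]
            simp [List.count_cons]
            ring
          · have hc' : ¬ (c = h) := fun e => hc e.symm
            rw [show PySem.Chars.count.go [c] (n+1) (h :: t) acc
                  = PySem.Chars.count.go [c] n t acc by
                  simp [PySem.Chars.count.go, List.isPrefixOf, hc']]
            rw [ih n acc hf]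
            simp [List.count_cons, hc']
            exact hc

lemma count_singleton (s : List Char) (c : Char) :
    PySem.Chars.count s [c] = s.count c := by
  simp [PySem.Chars.count]
  simpa using count_go_singleton c s s.length 0 le_rfl

-- A's loop is the sum of pvContrib over the distinct characters
lemma A_eq_sum (number : Int) :
    sum_repeated_digits number
      = ((PySem.Set.ofList (PySem.Int.toChars number)).map
          (pvContrib (PySem.Int.toChars number))).sum := by
  unfold sum_repeated_digits
  simp only []
  have hfun : (fun (total : Int) (digit : Char) =>
      if PySem.Chars.count (PySem.Int.toChars number) [digit] > 1 then
        total + pvDigitInt digit * ((PySem.Chars.count (PySem.Int.toChars number) [digit] : Nat) : Int)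
      else total)
      = fun total digit => total + pvContrib (PySem.Int.toChars number) digit := by
    funext total digit
    simp only [pvContrib, count_singleton]
    split <;> simp
  rw [hfun, PySem.List.foldl_add]
  simp

-- folding Set.add over elements all equal to a member changes nothing
lemma foldl_add_const (c : Char) :
    ∀ (t : List Char), (∀ x ∈ t, x = c) →
      List.foldl PySem.Set.add [c] t = [c] := by
  intro t
  induction t with
  | nil => simp
  | cons h r ih =>
      intro hall
      have hh : h = c := hall h (by simp)
      subst hh
      have : PySem.Set.add [h] h = [h] := by simp [PySem.Set.add]
      simp only [List.foldl_cons, this]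
      exact ih (fun x hx => hall x (by simp [hx]))

-- folding Set.add from a state whose head never occurs again commutes with cons
lemma foldl_add_fresh (c : Char) :
    ∀ (l s : List Char), c ∉ l →
      List.foldl PySem.Set.add (c :: s) l = c :: List.foldl PySem.Set.add s l := by
  intro l
  induction l with
  | nil => simp
  | cons h r ih =>
      intro s hc
      have hhc : h ≠ c := fun h' => hc (by simp [h'])
      have : PySem.Set.add (c :: s) h = c :: PySem.Set.add s h := by
        simp [PySem.Set.add, List.contains_cons, hhc, beq_iff_eq]
        split <;> simp
      simp only [List.foldl_cons, this]
      exact ih _ (fun h' => hc (by simp [h']))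

-- run scan of a sorted list computes the same sum over distinct characters
lemma runs_eq : ∀ (n : Nat) (m : List Char), m.length ≤ n →
    m.Pairwise (· ≤ ·) →
    pvRuns m = ((PySem.Set.ofList m).map (pvContrib m)).sum := by
  intro n
  induction n with
  | zero =>
      intro m hm _
      have : m = [] := List.eq_nil_of_length_eq_zero (Nat.le_zero.mp hm)
      subst this
      simp [pvRuns, PySem.Set.ofList, PySem.Set.empty]
  | succ n ih =>
      intro m hm hs
      cases m with
      | nil => simp [pvRuns, PySem.Set.ofList, PySem.Set.empty]
      | cons c rest =>
          set t := rest.takeWhile (fun d => d == c) with ht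
          set d := rest.dropWhile (fun d => d == c) with hd
          have hrest : rest = t ++ d := (List.takeWhile_append_dropWhile).symm
          have htc : ∀ x ∈ t, x = c := by
            intro x hx
            have := List.mem_takeWhile_imp hx
            simpa [beq_iff_eq] using this
          have hcle : ∀ x ∈ rest, c ≤ x := by
            intro x hx
            exact (List.pairwise_cons.mp hs).1 x hx
          have hdsub : d.Sublist rest := List.dropWhile_sublist _
          have hdpair : d.Pairwise (· ≤ ·) :=
            ((List.pairwise_cons.mp hs).2).sublist hdsub
          have hcd : c ∉ d := by
            cases hdd : d with
            | nil => simp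
            | cons h d' =>
                have hhne : ¬ (h == c) = true := by
                  have := List.head_dropWhile_not (fun d => d == c) (by rw [← hd, hdd]; simp)
                  simpa [← hd, hdd] using this
                have hhne' : h ≠ c := by simpa [beq_iff_eq] using hhne
                have hhmem : h ∈ rest := hdsub.mem (by rw [hdd]; simp)
                have hch : c < h := lt_of_le_of_ne (hcle h hhmem) (Ne.symm hhne')
                intro hmem
                rcases List.mem_cons.mp hmem with h1 | h2
                · exact hhne' h1.symm
                · have := (List.pairwise_cons.mp (hdd ▸ hdpair)).1 c h2
                  exact absurd (lt_of_lt_of_le hch this) (lt_irrefl c)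
          -- counts
          have hcount_c : (c :: rest).count c = t.length + 1 := by
            rw [hrest]
            simp [List.count_cons, List.count_append,
              List.count_eq_zero.mpr hcd,
              List.count_eq_length.mpr (fun b hb => ((htc b hb).symm : c = b))]
          have hcount_ne : ∀ x, x ≠ c → (c :: rest).count x = d.count x := by
            intro x hx
            rw [hrest]
            have hxt : t.count x = 0 :=
              List.count_eq_zero.mpr (fun hmem => hx (htc x hmem))
            have hx' : ¬ (c = x) := fun e => hx e.symm
            simp [List.count_cons, List.count_append, hxt, hx']
          -- set structure
          have hset : PySem.Set.ofList (c :: rest) = c :: PySem.Set.ofList d := by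
            show List.foldl PySem.Set.add PySem.Set.empty (c :: rest)
                = c :: List.foldl PySem.Set.add PySem.Set.empty d
            rw [hrest]
            simp only [List.foldl_cons, List.foldl_append]
            have h1 : PySem.Set.add PySem.Set.empty c = [c] := by
              simp [PySem.Set.add, PySem.Set.empty]
            rw [h1, foldl_add_const c t htc]
            exact foldl_add_fresh c d PySem.Set.empty hcd
          -- length for IH
          have hlen : d.length ≤ n := by
            have h1 : d.length ≤ rest.length := List.length_dropWhile_le _ _
            simp only [List.length_cons] at hm
            omega
          have hIH := ih d hlen hdpair
          -- contributions over d agree between (c :: rest) and d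
          have hmap : (PySem.Set.ofList d).map (pvContrib (c :: rest))
              = (PySem.Set.ofList d).map (pvContrib d) := by
            apply List.map_congr_left
            intro x hx
            have hxd : x ∈ d := (PySem.Set.mem_ofList d x).mp hx
            have hxc : x ≠ c := fun h' => hcd (h' ▸ hxd)
            simp [pvContrib, hcount_ne x hxc]
          -- head contribution
          have hhead : pvContrib (c :: rest) c
              = (if t.length + 1 > 1 then pvDigitInt c * (((t.length + 1 : Nat) : Int)) else 0) := by
            simp [pvContrib, hcount_c]
          rw [show pvRuns (c :: rest)
                = (if t.length + 1 > 1 then pvDigitInt c * (((t.length + 1 : Nat) : Int)) else 0)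
                  + pvRuns d by rw [pvRuns]]
          rw [hIH, hset, List.map_cons, List.sum_cons, hhead, hmap]

-- ===== VERDICT (by name: the statement is the Claim_ definition above) =====
theorem sum_repeated_digits_spec : Claim_equal_sum_repeated_digits := by
  intro number _
  unfold Spec_sum_repeated_digits
  set s := PySem.Int.toChars number with hs
  set m := PySem.List.sorted s id with hm
  have hperm : m.Perm s := PySem.List.sorted_perm s id false
  have hpair : m.Pairwise (· ≤ ·) := by
    have := PySem.List.sorted_pairwise s id
    simpa using this
  have hB : sum_repeated_digits_alt number = ((PySem.Set.ofList m).map (pvContrib m)).sum := by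
    unfold sum_repeated_digits_alt
    exact runs_eq m.length m le_rfl hpair
  have hcontrib : pvContrib m = pvContrib s := by
    funext x
    simp [pvContrib, hperm.count_eq]
  have hsetperm : (PySem.Set.ofList m).Perm (PySem.Set.ofList s) := by
    rw [List.perm_ext_iff_of_nodup (PySem.Set.nodup_ofList m) (PySem.Set.nodup_ofList s)]
    intro a
    rw [PySem.Set.mem_ofList, PySem.Set.mem_ofList]
    exact ⟨fun h => hperm.mem_iff.mp h, fun h => hperm.mem_iff.mpr h⟩
  rw [A_eq_sum, hB, hcontrib]
  exact ((hsetperm.map (pvContrib s)).sum_eq).symm
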